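-- pv_equiv track=rewrite | github.com/weltonvaz/beecrowd | 2140/test_main.py | troco_possivel
-- ===== SOURCE A (Python) =====
-- def troco_possivel(valor_compra: int, valor_pago: int) -> bool:
--   """
--   Verifica se é possível devolver o troco exato de uma compra utilizando apenas duas notas.
--
--   Argumentos:
--     valor_compra (int): O valor da compra.
--     valor_pago (int): O valor pago pelo cliente.
--
--   Retorno:
--     bool: True se for possível devolver o troco exato, False caso contrário.
--   """
--   troco = valor_pago - valor_compra
--
--   if troco == 0:
--     return True
--
--   notas_disponiveis = [100, 50, 20, 10, 5, 2]
--
--   for nota in notas_disponiveis: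
--     if troco >= nota:
--       troco -= nota
--       if troco == 0:
--         return True
--
--   return False
-- ===== SOURCE B (Python) =====
-- def troco_possivel(valor_compra: int, valor_pago: int) -> bool:
--     # Subset-sum formulation: the notes are super-increasing, so the greedy
--     # accepts exactly the subset sums of [100, 50, 20, 10, 5, 2] (0 included
--     # via the empty subset; negatives are simply absent).
--     reachable = {0}
--     for nota in [100, 50, 20, 10, 5, 2]:
--         reachable |= {s + nota for s in reachable}
--     return (valor_pago - valor_compra) in reachable
-- ===== Notes on version B (the rewrite author's own statement) =====
-- stated objective: alternative
-- what changed: B replaces the greedy subtract-and-test loop by building the set of all subset sums of the fixed notes once and testing membership of the change; equivalence rests on the notes being super-increasing.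
import Mathlib
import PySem

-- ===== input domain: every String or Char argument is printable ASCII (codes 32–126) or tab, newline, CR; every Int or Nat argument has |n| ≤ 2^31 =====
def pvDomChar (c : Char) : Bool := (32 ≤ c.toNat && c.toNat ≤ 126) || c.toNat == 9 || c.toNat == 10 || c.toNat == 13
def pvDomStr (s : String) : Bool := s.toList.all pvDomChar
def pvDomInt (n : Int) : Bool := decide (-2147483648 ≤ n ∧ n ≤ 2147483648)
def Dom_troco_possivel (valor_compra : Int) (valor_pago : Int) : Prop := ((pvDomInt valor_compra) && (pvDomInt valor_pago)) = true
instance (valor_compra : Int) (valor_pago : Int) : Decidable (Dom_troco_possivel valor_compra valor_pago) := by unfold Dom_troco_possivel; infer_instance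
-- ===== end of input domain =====

-- B replaces A's greedy subtract-and-test loop by a subset-sum set of the fixed
-- notes and a membership test (alternative algorithm, same constant cost).


-- ===== PORT A =====
-- A's loop over notas_disponiveis with early return, as structural recursion on the list.
def trocoLoopA (troco : Int) : List Int → Bool
  | [] => false
  | nota :: notas =>
    if troco ≥ nota then
      if troco - nota = 0 then true else trocoLoopA (troco - nota) notas
    else trocoLoopA troco notas

def troco_possivel (valor_compra : Int) (valor_pago : Int) : Bool :=
  let troco := valor_pago - valor_compra
  if troco = 0 then true
  else trocoLoopA troco [100, 50, 20, 10, 5, 2]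

-- ===== PORT B =====
def troco_possivel_alt (valor_compra : Int) (valor_pago : Int) : Bool :=
  let reachable :=
    [(100 : Int), 50, 20, 10, 5, 2].foldl
      (fun r nota => PySem.Set.union r (PySem.Set.ofList (r.map (· + nota))))
      (PySem.Set.ofList [0])
  PySem.Set.contains reachable (valor_pago - valor_compra)

-- ===== PRECONDITION & SPEC =====
def Spec_troco_possivel (valor_compra : Int) (valor_pago : Int) (out : Bool) : Prop := out = troco_possivel_alt valor_compra valor_pago
instance (valor_compra : Int) (valor_pago : Int) (out : Bool) : Decidable (Spec_troco_possivel valor_compra valor_pago out) := by unfold Spec_troco_possivel; infer_instance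

-- ===== CLAIM (what is proved, stated in full; the proofs are below) =====
def Claim_equal_troco_possivel : Prop := ∀ (valor_compra : Int) (valor_pago : Int), Dom_troco_possivel valor_compra valor_pago → Spec_troco_possivel valor_compra valor_pago (troco_possivel valor_compra valor_pago)

-- ===== LEMMAS AND PROOFS =====
set_option maxRecDepth 8000 in
set_option maxHeartbeats 2000000 in
theorem fold_eval :
    ([(100 : Int), 50, 20, 10, 5, 2].foldl
      (fun r nota => PySem.Set.union r (PySem.Set.ofList (r.map (· + nota))))
      (PySem.Set.ofList [0])) = [(0 : Int), 100, 50, 150, 20, 120, 70, 170, 10, 110, 60, 160, 30, 130, 80, 180, 5, 105, 55, 155, 25, 125, 75, 175, 15, 115, 65, 165, 35, 135, 85, 185, 2, 102, 52, 152, 22, 122, 72, 172, 12, 112, 62, 162, 32, 132, 82, 182, 7, 107, 57, 157, 27, 127, 77, 177, 17, 117, 67, 167, 37, 137, 87, 187] := by decide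

theorem loop_neg (t : Int) (ht : t < 0) :
    ∀ notas : List Int, (∀ n ∈ notas, 0 < n) → trocoLoopA t notas = false := by
  intro notas
  induction notas with
  | nil => intro _; rfl
  | cons n ns ih =>
    intro hpos
    have hn : 0 < n := hpos n (List.mem_cons_self ..)
    simp only [trocoLoopA]
    rw [if_neg (by omega)]
    exact ih (fun m hm => hpos m (List.mem_cons_of_mem _ hm))

theorem loop_big :
    ∀ (notas : List Int) (t : Int), (∀ n ∈ notas, 0 < n) → notas.sum < t → trocoLoopA t notas = false := by
  intro notas
  induction notas with
  | nil => intros; rfl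
  | cons n ns ih =>
    intro t hpos hs
    have hn : 0 < n := hpos n (List.mem_cons_self ..)
    have hns : 0 ≤ ns.sum := List.sum_nonneg (fun m hm => le_of_lt (hpos m (List.mem_cons_of_mem _ hm)))
    rw [List.sum_cons] at hs
    simp only [trocoLoopA]
    rw [if_pos (by omega), if_neg (by omega)]
    exact ih (t - n) (fun m hm => hpos m (List.mem_cons_of_mem _ hm)) (by omega)

theorem lhs_false_outside (t : Int) (h : t < 0 ∨ 187 < t) :
    (if t = 0 then true else trocoLoopA t [100, 50, 20, 10, 5, 2]) = false := by
  rw [if_neg (by omega)]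
  rcases h with h | h
  · exact loop_neg t h _ (by decide)
  · exact loop_big [100, 50, 20, 10, 5, 2] t (by decide) (by norm_num; omega)

set_option maxRecDepth 8000 in
theorem rhs_false_outside (t : Int) (h : t < 0 ∨ 187 < t) :
    PySem.Set.contains
      ([(100 : Int), 50, 20, 10, 5, 2].foldl
        (fun r nota => PySem.Set.union r (PySem.Set.ofList (r.map (· + nota))))
        (PySem.Set.ofList [0])) t = false := by
  rw [fold_eval]
  simp only [PySem.Set.contains, List.contains_eq_mem, List.mem_cons, List.not_mem_nil,
    or_false, decide_eq_false_iff_not]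
  omega

set_option maxRecDepth 8000 in
set_option maxHeartbeats 2000000 in
theorem troco_core (t : Int) :
    (if t = 0 then true else trocoLoopA t [100, 50, 20, 10, 5, 2]) =
    PySem.Set.contains
      ([(100 : Int), 50, 20, 10, 5, 2].foldl
        (fun r nota => PySem.Set.union r (PySem.Set.ofList (r.map (· + nota))))
        (PySem.Set.ofList [0])) t := by
  rcases lt_trichotomy t 0 with h | h | h
  · rw [lhs_false_outside t (Or.inl h), rhs_false_outside t (Or.inl h)]
  · subst h; decide
  · by_cases hb : 187 < t
    · rw [lhs_false_outside t (Or.inr hb), rhs_false_outside t (Or.inr hb)]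
    · rw [fold_eval]
      have h1 : 1 ≤ t := h
      have h2 : t ≤ 187 := by omega
      interval_cases t <;> decide

-- ===== VERDICT (by name: the statement is the Claim_ definition above) =====
theorem troco_possivel_spec : Claim_equal_troco_possivel := by
  intro vc vp _
  unfold Spec_troco_possivel troco_possivel troco_possivel_alt
  exact troco_core (vp - vc)
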